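-- pv_equiv track=rewrite | github.com/MuratKus/flaky-test-detector | src/flakydetector/parsers/plain_log.py | _find_nearest_trace
-- ===== SOURCE A (Python) =====
-- def _find_nearest_trace(
--     after_pos: int,
--     traces: list[tuple[int, str]],
--     claimed: set[int],
--     name: str = "",
--     classname: str = "",
-- ) -> str | None:
--     """Find the nearest unclaimed stacktrace, preferring name/class match."""
--     # First try name/class match
--     for i, (_pos, trace) in enumerate(traces):
--         if i in claimed:
--             continue
--         if (name and name in trace) or (classname and classname in trace):
--             claimed.add(i)
--             return trace
--
--     # Fall back to nearest trace after the match position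
--     for i, (pos, trace) in enumerate(traces):
--         if i in claimed:
--             continue
--         if pos > after_pos:
--             claimed.add(i)
--             return trace
--
--     return None
-- ===== SOURCE B (Python) =====
-- def _find_nearest_trace(
--     after_pos: int,
--     traces: list[tuple[int, str]],
--     claimed: set[int],
--     name: str = "",
--     classname: str = "",
-- ) -> str | None:
--     """Single pass: record first unclaimed name/class match and first
--     unclaimed trace past after_pos, then prefer the name match."""
--     name_cand = None
--     pos_cand = None
--     for i, (pos, trace) in enumerate(traces):
--         if i in claimed:
--             continue
--         if name_cand is None and ((name and name in trace) or (classname and classname in trace)):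
--             name_cand = (i, trace)
--         if pos_cand is None and pos > after_pos:
--             pos_cand = (i, trace)
--     if name_cand is not None:
--         claimed.add(name_cand[0])
--         return name_cand[1]
--     if pos_cand is not None:
--         claimed.add(pos_cand[0])
--         return pos_cand[1]
--     return None
-- ===== Notes on version B (the rewrite author's own statement) =====
-- stated objective: alternative
-- what changed: Replaced A's two sequential scans of the trace list (name/class pass, then position pass) by a single pass that records the first unclaimed name/class match and the first unclaimed position match and prefers the name match afterwards.
import Mathlib
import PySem

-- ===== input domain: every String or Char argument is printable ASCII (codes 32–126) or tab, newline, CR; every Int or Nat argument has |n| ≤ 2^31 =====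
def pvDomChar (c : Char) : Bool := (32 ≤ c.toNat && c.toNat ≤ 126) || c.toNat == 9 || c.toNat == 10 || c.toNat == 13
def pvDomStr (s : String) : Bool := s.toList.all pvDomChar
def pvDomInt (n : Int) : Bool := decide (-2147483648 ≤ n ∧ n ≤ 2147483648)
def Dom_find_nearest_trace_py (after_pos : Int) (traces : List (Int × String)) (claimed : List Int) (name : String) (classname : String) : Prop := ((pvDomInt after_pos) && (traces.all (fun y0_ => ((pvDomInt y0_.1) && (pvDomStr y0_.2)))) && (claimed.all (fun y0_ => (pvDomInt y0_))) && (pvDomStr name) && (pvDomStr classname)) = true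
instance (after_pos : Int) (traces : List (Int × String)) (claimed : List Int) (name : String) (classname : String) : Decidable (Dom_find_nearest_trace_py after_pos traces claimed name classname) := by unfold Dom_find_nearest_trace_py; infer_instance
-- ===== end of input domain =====

-- B replaces A's two sequential scans by one pass that records the first unclaimed name/class
-- match and the first unclaimed position match (objective: alternative decomposition, same cost).
-- A and B both mutate `claimed` in Python (each adds exactly the returned index); the
-- equivalence proved here is about the RETURN value only.

-- ===== PORT A =====
-- `(name and name in trace) or (classname and classname in trace)` (shared by both ports: both Pythons test it verbatim)
def fntA_match (name classname trace : String) : Bool :=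
  (!(name == "") && PySem.Str.isIn name trace) || (!(classname == "") && PySem.Str.isIn classname trace)

-- first loop: first unclaimed trace with a name/class match
def fntA_loop1 (claimed : List Int) (name classname : String) : List (Int × (Int × String)) → Option String
  | [] => none
  | (i, (_pos, trace)) :: rest =>
    if claimed.contains i then fntA_loop1 claimed name classname rest
    else if fntA_match name classname trace then some trace
    else fntA_loop1 claimed name classname rest

-- second loop: first unclaimed trace with pos > after_pos
def fntA_loop2 (after_pos : Int) (claimed : List Int) : List (Int × (Int × String)) → Option String
  | [] => none
  | (i, (pos, trace)) :: rest =>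
    if claimed.contains i then fntA_loop2 after_pos claimed rest
    else if after_pos < pos then some trace
    else fntA_loop2 after_pos claimed rest

def find_nearest_trace_py (after_pos : Int) (traces : List (Int × String)) (claimed : List Int) (name : String) (classname : String) : Option String :=
  match fntA_loop1 claimed name classname (PySem.List.enumerate traces 0) with
  | some trace => some trace
  | none => fntA_loop2 after_pos claimed (PySem.List.enumerate traces 0)

-- ===== PORT B =====
-- single pass: each candidate is set at most once (first encounter)
def fntB_go (after_pos : Int) (claimed : List Int) (name classname : String)
    (nc pc : Option (Int × String)) : List (Int × (Int × String)) → Option (Int × String) × Option (Int × String)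
  | [] => (nc, pc)
  | (i, (pos, trace)) :: rest =>
    if claimed.contains i then fntB_go after_pos claimed name classname nc pc rest
    else
      let nc' := if nc.isNone && fntA_match name classname trace then some (i, trace) else nc
      let pc' := if pc.isNone && decide (after_pos < pos) then some (i, trace) else pc
      fntB_go after_pos claimed name classname nc' pc' rest

def find_nearest_trace_py_alt (after_pos : Int) (traces : List (Int × String)) (claimed : List Int) (name : String) (classname : String) : Option String :=
  match fntB_go after_pos claimed name classname none none (PySem.List.enumerate traces 0) with
  | (some nc, _) => some nc.2
  | (none, some pc) => some pc.2
  | (none, none) => none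

-- ===== PRECONDITION & SPEC =====
def Spec_find_nearest_trace_py (after_pos : Int) (traces : List (Int × String)) (claimed : List Int) (name : String) (classname : String) (out : Option String) : Prop := out = find_nearest_trace_py_alt after_pos traces claimed name classname
instance (after_pos : Int) (traces : List (Int × String)) (claimed : List Int) (name : String) (classname : String) (out : Option String) : Decidable (Spec_find_nearest_trace_py after_pos traces claimed name classname out) := by unfold Spec_find_nearest_trace_py; infer_instance

-- ===== CLAIM (what is proved, stated in full; the proofs are below) =====
def Claim_equal_find_nearest_trace_py : Prop := ∀ (after_pos : Int) (traces : List (Int × String)) (claimed : List Int) (name : String) (classname : String), Dom_find_nearest_trace_py after_pos traces claimed name classname → Spec_find_nearest_trace_py after_pos traces claimed name classname (find_nearest_trace_py after_pos traces claimed name classname)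

-- ===== LEMMAS AND PROOFS =====

-- proof-side characterisations: the first unclaimed name-match / position-match pair
def fntFirstName (claimed : List Int) (name classname : String) : List (Int × (Int × String)) → Option (Int × String)
  | [] => none
  | (i, (_pos, trace)) :: rest =>
    if claimed.contains i then fntFirstName claimed name classname rest
    else if fntA_match name classname trace then some (i, trace)
    else fntFirstName claimed name classname rest

def fntFirstPos (after_pos : Int) (claimed : List Int) : List (Int × (Int × String)) → Option (Int × String)
  | [] => none
  | (i, (pos, trace)) :: rest =>
    if claimed.contains i then fntFirstPos after_pos claimed rest
    else if after_pos < pos then some (i, trace)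
    else fntFirstPos after_pos claimed rest

theorem fntA_loop1_eq (claimed : List Int) (name classname : String) (l : List (Int × (Int × String))) :
    fntA_loop1 claimed name classname l = (fntFirstName claimed name classname l).map (·.2) := by
  induction l with
  | nil => rfl
  | cons x rest ih =>
    obtain ⟨i, pos, trace⟩ := x
    simp only [fntA_loop1, fntFirstName]
    split_ifs <;> simp [ih]

theorem fntA_loop2_eq (after_pos : Int) (claimed : List Int) (l : List (Int × (Int × String))) :
    fntA_loop2 after_pos claimed l = (fntFirstPos after_pos claimed l).map (·.2) := by
  induction l with
  | nil => rfl
  | cons x rest ih =>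
    obtain ⟨i, pos, trace⟩ := x
    simp only [fntA_loop2, fntFirstPos]
    split_ifs <;> simp [ih]

theorem fntB_go_eq (after_pos : Int) (claimed : List Int) (name classname : String)
    (l : List (Int × (Int × String))) : ∀ (nc pc : Option (Int × String)),
    fntB_go after_pos claimed name classname nc pc l =
      ((match nc with | some x => some x | none => fntFirstName claimed name classname l),
       (match pc with | some x => some x | none => fntFirstPos after_pos claimed l)) := by
  induction l with
  | nil => intro nc pc; cases nc <;> cases pc <;> rfl
  | cons x rest ih =>
    intro nc pc
    obtain ⟨i, pos, trace⟩ := x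
    simp only [fntB_go, fntFirstName, fntFirstPos]
    by_cases hm : i ∈ claimed
    · simp [hm, ih]
    · simp only [List.elem_eq_contains] at *
      rw [ih]
      simp only [(by simp [hm] : claimed.contains i = false), Bool.false_eq_true, if_neg,
        not_false_eq_true]
      cases nc <;> cases pc <;>
        simp only [Option.isNone_none, Option.isNone_some, Bool.true_and, Bool.false_and,
          fntA_match, fntA_match] <;>
        split_ifs <;> simp_all

-- ===== VERDICT (by name: the statement is the Claim_ definition above) =====
theorem find_nearest_trace_py_spec : Claim_equal_find_nearest_trace_py := by
  intro after_pos traces claimed name classname _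
  unfold Spec_find_nearest_trace_py find_nearest_trace_py find_nearest_trace_py_alt
  rw [fntB_go_eq, fntA_loop1_eq, fntA_loop2_eq]
  cases fntFirstName claimed name classname (PySem.List.enumerate traces 0) <;>
    cases fntFirstPos after_pos claimed (PySem.List.enumerate traces 0) <;> rfl
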